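-- pv_equiv track=rewrite | github.com/dudasdavid/revvyframework_ros | scripts/revvy/mcu/rrrc_transport.py | crc7
-- ===== SOURCE A (Python) =====
-- def crc7(data, crc=0xFF):
--     crc7_table = [
--         0x00, 0x09, 0x12, 0x1b, 0x24, 0x2d, 0x36, 0x3f,
--         0x48, 0x41, 0x5a, 0x53, 0x6c, 0x65, 0x7e, 0x77,
--         0x19, 0x10, 0x0b, 0x02, 0x3d, 0x34, 0x2f, 0x26,
--         0x51, 0x58, 0x43, 0x4a, 0x75, 0x7c, 0x67, 0x6e,
--         0x32, 0x3b, 0x20, 0x29, 0x16, 0x1f, 0x04, 0x0d,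
--         0x7a, 0x73, 0x68, 0x61, 0x5e, 0x57, 0x4c, 0x45,
--         0x2b, 0x22, 0x39, 0x30, 0x0f, 0x06, 0x1d, 0x14,
--         0x63, 0x6a, 0x71, 0x78, 0x47, 0x4e, 0x55, 0x5c,
--         0x64, 0x6d, 0x76, 0x7f, 0x40, 0x49, 0x52, 0x5b,
--         0x2c, 0x25, 0x3e, 0x37, 0x08, 0x01, 0x1a, 0x13,
--         0x7d, 0x74, 0x6f, 0x66, 0x59, 0x50, 0x4b, 0x42,
--         0x35, 0x3c, 0x27, 0x2e, 0x11, 0x18, 0x03, 0x0a,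
--         0x56, 0x5f, 0x44, 0x4d, 0x72, 0x7b, 0x60, 0x69,
--         0x1e, 0x17, 0x0c, 0x05, 0x3a, 0x33, 0x28, 0x21,
--         0x4f, 0x46, 0x5d, 0x54, 0x6b, 0x62, 0x79, 0x70,
--         0x07, 0x0e, 0x15, 0x1c, 0x23, 0x2a, 0x31, 0x38,
--         0x41, 0x48, 0x53, 0x5a, 0x65, 0x6c, 0x77, 0x7e,
--         0x09, 0x00, 0x1b, 0x12, 0x2d, 0x24, 0x3f, 0x36,
--         0x58, 0x51, 0x4a, 0x43, 0x7c, 0x75, 0x6e, 0x67,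
--         0x10, 0x19, 0x02, 0x0b, 0x34, 0x3d, 0x26, 0x2f,
--         0x73, 0x7a, 0x61, 0x68, 0x57, 0x5e, 0x45, 0x4c,
--         0x3b, 0x32, 0x29, 0x20, 0x1f, 0x16, 0x0d, 0x04,
--         0x6a, 0x63, 0x78, 0x71, 0x4e, 0x47, 0x5c, 0x55,
--         0x22, 0x2b, 0x30, 0x39, 0x06, 0x0f, 0x14, 0x1d,
--         0x25, 0x2c, 0x37, 0x3e, 0x01, 0x08, 0x13, 0x1a,
--         0x6d, 0x64, 0x7f, 0x76, 0x49, 0x40, 0x5b, 0x52,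
--         0x3c, 0x35, 0x2e, 0x27, 0x18, 0x11, 0x0a, 0x03,
--         0x74, 0x7d, 0x66, 0x6f, 0x50, 0x59, 0x42, 0x4b,
--         0x17, 0x1e, 0x05, 0x0c, 0x33, 0x3a, 0x21, 0x28,
--         0x5f, 0x56, 0x4d, 0x44, 0x7b, 0x72, 0x69, 0x60,
--         0x0e, 0x07, 0x1c, 0x15, 0x2a, 0x23, 0x38, 0x31,
--         0x46, 0x4f, 0x54, 0x5d, 0x62, 0x6b, 0x70, 0x79]
--
--     for b in data:
--         crc = crc7_table[(b ^ (crc << 1) & 0xFF)]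
--     return crc
-- ===== SOURCE B (Python) =====
-- def crc7(data, crc=0xFF):
--     # Bitwise CRC-7/MMC (poly 0x09): long division bit by bit, no lookup table.
--     for b in data:
--         reg = (b ^ (crc << 1)) & 0xFF
--         for _ in range(8):
--             if reg & 0x80:
--                 reg ^= 0x89
--             reg = (reg << 1) & 0xFF
--         crc = reg >> 1
--     return crc
-- ===== Notes on version B (the rewrite author's own statement) =====
-- stated objective: alternative
-- what changed: Replaces the 256-entry CRC7 lookup table with bit-by-bit polynomial division (8 shift/xor rounds per byte), trading the table for an inner loop of constant work.
import Mathlib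
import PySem

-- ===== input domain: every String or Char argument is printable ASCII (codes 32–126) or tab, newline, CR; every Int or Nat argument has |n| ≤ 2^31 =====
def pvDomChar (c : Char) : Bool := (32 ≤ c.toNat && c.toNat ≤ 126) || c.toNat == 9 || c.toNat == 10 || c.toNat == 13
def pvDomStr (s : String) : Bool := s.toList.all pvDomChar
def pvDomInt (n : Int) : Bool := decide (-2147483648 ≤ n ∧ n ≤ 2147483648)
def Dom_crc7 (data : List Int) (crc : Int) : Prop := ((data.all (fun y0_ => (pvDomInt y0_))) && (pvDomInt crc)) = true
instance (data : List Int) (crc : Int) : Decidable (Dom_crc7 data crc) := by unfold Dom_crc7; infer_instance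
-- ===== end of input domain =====

-- B replaces A's 256-entry CRC7 lookup table by bit-by-bit polynomial division (same cost class).


-- ===== PORT A =====
def crc7Table : List Int := [0, 9, 18, 27, 36, 45, 54, 63, 72, 65, 90, 83, 108, 101, 126, 119, 25, 16, 11, 2, 61, 52, 47, 38, 81, 88, 67, 74, 117, 124, 103, 110, 50, 59, 32, 41, 22, 31, 4, 13, 122, 115, 104, 97, 94, 87, 76, 69, 43, 34, 57, 48, 15, 6, 29, 20, 99, 106, 113, 120, 71, 78, 85, 92, 100, 109, 118, 127, 64, 73, 82, 91, 44, 37, 62, 55, 8, 1, 26, 19, 125, 116, 111, 102, 89, 80, 75, 66, 53, 60, 39, 46, 17, 24, 3, 10, 86, 95, 68, 77, 114, 123, 96, 105, 30, 23, 12, 5, 58, 51, 40, 33, 79, 70, 93, 84, 107, 98, 121, 112, 7, 14, 21, 28, 35, 42, 49, 56, 65, 72, 83, 90, 101, 108, 119, 126, 9, 0, 27, 18, 45, 36, 63, 54, 88, 81, 74, 67, 124, 117, 110, 103, 16, 25, 2, 11, 52, 61, 38, 47, 115, 122, 97, 104, 87, 94, 69, 76, 59, 50, 41, 32, 31, 22,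 13, 4, 106, 99, 120, 113, 78, 71, 92, 85, 34, 43, 48, 57, 6, 15, 20, 29, 37, 44, 55, 62, 1, 8, 19, 26, 109, 100, 127, 118, 73, 64, 91, 82, 60, 53, 46, 39, 24, 17, 10, 3, 116, 125, 102, 111, 80, 89, 66, 75, 23, 30, 5, 12, 51, 58, 33, 40, 95, 86, 77, 68, 123, 114, 105, 96, 14, 7, 28, 21, 42, 35, 56, 49, 70, 79, 84, 93, 98, 107, 112, 121]

-- Python: for b in data: crc = crc7_table[b ^ (crc << 1) & 0xFF].  An out-of-range index is an
-- IndexError: pyGet? returns none there; Pre_crc7 excludes those inputs, so '.getD 0' is unreachable.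
def crc7 (data : List Int) (crc : Int) : Int :=
  data.foldl
    (fun c b =>
      (PySem.List.pyGet? crc7Table (PySem.Int.bxor b (PySem.Int.band (c <<< (1 : Nat)) 255))).getD 0)
    crc

-- ===== PORT B =====
-- one round of the inner 'for _ in range(8)' loop: if reg & 0x80: reg ^= 0x89; reg = (reg << 1) & 0xFF
def crc7Round (reg : Int) : Int :=
  let reg' := if PySem.Int.band reg 128 ≠ 0 then PySem.Int.bxor reg 137 else reg
  PySem.Int.band (reg' <<< (1 : Nat)) 255

-- the 8 rounds followed by 'reg >> 1'
def crc7Bits (reg : Int) : Int :=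
  ((List.range 8).foldl (fun r _ => crc7Round r) reg) >>> (1 : Nat)

def crc7_alt (data : List Int) (crc : Int) : Int :=
  data.foldl
    (fun c b => crc7Bits (PySem.Int.band (PySem.Int.bxor b (c <<< (1 : Nat))) 255))
    crc

-- ===== PRECONDITION & SPEC =====
-- Pre_: exactly the inputs where the Python A returns: any data byte outside [-256, 255] makes A's
-- table index fall outside [-256, 255] and raises IndexError (negative indices in range wrap and return).
def Pre_crc7 (data : List Int) (crc : Int) : Prop := ∀ b ∈ data, -256 ≤ b ∧ b < 256
instance (data : List Int) (crc : Int) : Decidable (Pre_crc7 data crc) := by unfold Pre_crc7; infer_instance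
def pvWitness_crc7 : List Int × Int := ([18, 255], 255)

def Spec_crc7 (data : List Int) (crc : Int) (out : Int) : Prop := out = crc7_alt data crc
instance (data : List Int) (crc : Int) (out : Int) : Decidable (Spec_crc7 data crc out) := by unfold Spec_crc7; infer_instance

-- ===== CLAIM (what is proved, stated in full; the proofs are below) =====
def Claim_equal_crc7 : Prop := ∀ (data : List Int) (crc : Int), Dom_crc7 data crc → Pre_crc7 data crc → Spec_crc7 data crc (crc7 data crc)

-- ===== LEMMAS AND PROOFS =====

-- x & 255 is x mod 256 (Python two's-complement & on any integer)
lemma nat_e255 (m : Nat) : m % 256 = m &&& 255 := by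
  have h := Nat.and_two_pow_sub_one_eq_mod m 8
  simp only [show (2:Nat)^8 = 256 from rfl] at h
  exact h.symm

lemma band255_emod (x : Int) : PySem.Int.band x 255 = x % 256 := by
  unfold PySem.Int.band
  have h255 : ((255:Int).toNat) = 255 := rfl
  split
  · simp only [show ((0:Int) <= 255) = True by simp, if_true, h255]
    rw [<- nat_e255]
    omega
  · simp only [show ((0:Int) <= 255) = True by simp, if_true, h255]
    rw [Nat.and_comm, <- nat_e255]
    omega

-- Nat core: xor then mask = mask then xor then mask
lemma nat_xor_mask (a k : Nat) : (a ^^^ k) % 256 = (a ^^^ k % 256) % 256 := by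
  rw [nat_e255, nat_e255 k, nat_e255 (a ^^^ (k &&& 255)), Nat.and_xor_distrib_right,
      Nat.and_xor_distrib_right, Nat.and_assoc,
      show ((255:Nat) &&& 255) = 255 from rfl]

-- 255 ^^^ x = 255 - x for x < 256
set_option maxRecDepth 20000 in
lemma nat_xor_255 (x : Nat) (h : x < 256) : 255 ^^^ x = 255 - x := by
  have hall : ∀ y ∈ List.range 256, 255 ^^^ y = 255 - y := by decide
  exact hall x (List.mem_range.mpr h)

-- Nat core for a sign-mixed xor: xor with the complement of k's low byte
lemma nat_xor_n2 (a k : Nat) : (a ^^^ (255 - k % 256)) % 256 = 255 - (a ^^^ k) % 256 := by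
  have hk : k % 256 < 256 := by omega
  have hx : (a ^^^ k) % 256 < 256 := by omega
  rw [<- nat_xor_255 (k % 256) hk, <- nat_xor_255 ((a ^^^ k) % 256) hx]
  rw [nat_e255 (a ^^^ (255 ^^^ k % 256)), nat_e255 k, nat_e255 (a ^^^ k)]
  rw [Nat.and_xor_distrib_right, Nat.and_xor_distrib_right, Nat.and_xor_distrib_right]
  rw [Nat.and_assoc, show ((255:Nat)&&&255) = 255 from rfl]
  simp [Nat.xor_left_comm]

-- bounds of b ^ m for b ∈ [-256,256), m ∈ [0,256)
lemma bxor_bounds (b m : Int) (hb1 : -256 <= b) (hb2 : b < 256) (hm1 : 0 <= m) (hm2 : m < 256) :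
    -256 <= PySem.Int.bxor b m ∧ PySem.Int.bxor b m < 256 := by
  have hxlt : ∀ p q : Nat, p < 256 -> q < 256 -> (p ^^^ q) < 256 := by
    intro p q hp hq
    exact Nat.xor_lt_two_pow (n := 8) hp hq
  unfold PySem.Int.bxor
  split
  · have := hxlt b.toNat m.toNat (by omega) (by omega)
    omega
  · have := hxlt (-b-1).toNat m.toNat (by omega) (by omega)
    omega

-- locality: (b ^ y) mod 256 only depends on y mod 256
lemma bxor_emod_local (b y : Int) :
    (PySem.Int.bxor b y) % 256 = (PySem.Int.bxor b (y % 256)) % 256 := by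
  have hy1 : 0 <= y % 256 := by omega
  unfold PySem.Int.bxor
  by_cases hb : 0 <= b
  · rw [if_pos hb, if_pos hb, if_pos hy1]
    by_cases hy : 0 <= y
    · rw [if_pos hy]
      have ht : (y % 256).toNat = y.toNat % 256 := by omega
      have h := nat_xor_mask b.toNat y.toNat
      rw [ht]
      omega
    · rw [if_neg hy]
      have ht : (y % 256).toNat = 255 - (-y-1).toNat % 256 := by omega
      have h := nat_xor_n2 b.toNat (-y-1).toNat
      rw [ht]
      omega
  · rw [if_neg hb, if_neg hb, if_pos hy1]
    by_cases hy : 0 <= y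
    · rw [if_pos hy]
      have ht : (y % 256).toNat = y.toNat % 256 := by omega
      have h := nat_xor_mask (-b-1).toNat y.toNat
      rw [ht]
      omega
    · rw [if_neg hy]
      have ht : (y % 256).toNat = 255 - (-y-1).toNat % 256 := by omega
      have h := nat_xor_n2 (-b-1).toNat (-y-1).toNat
      rw [ht]
      omega

def idxList : List Int := (List.range 256).map Int.ofNat ++ (List.range 256).map Int.negSucc

set_option maxRecDepth 100000 in
lemma core_decide :
    idxList.all (fun idx =>
      (PySem.List.pyGet? crc7Table idx).getD 0 == crc7Bits (PySem.Int.band idx 255)) = true := by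
  decide

lemma mem_idxList (idx : Int) (h1 : -256 <= idx) (h2 : idx < 256) : idx ∈ idxList := by
  unfold idxList
  rw [List.mem_append]
  cases idx with
  | ofNat n =>
    left
    rw [List.mem_map]
    have hn : (n : Int) < 256 := h2
    exact ⟨n, List.mem_range.mpr (by exact_mod_cast hn), rfl⟩
  | negSucc n =>
    right
    rw [List.mem_map]
    exact ⟨n, List.mem_range.mpr (by omega), rfl⟩

lemma core (idx : Int) (h1 : -256 <= idx) (h2 : idx < 256) :
    (PySem.List.pyGet? crc7Table idx).getD 0 = crc7Bits (PySem.Int.band idx 255) := by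
  have hall := core_decide
  rw [List.all_eq_true] at hall
  exact eq_of_beq (hall idx (mem_idxList idx h1 h2))

-- the two loop bodies agree on every byte in [-256, 256)
lemma step_eq (c b : Int) (hb1 : -256 <= b) (hb2 : b < 256) :
    (PySem.List.pyGet? crc7Table (PySem.Int.bxor b (PySem.Int.band (c <<< (1 : Nat)) 255))).getD 0
      = crc7Bits (PySem.Int.band (PySem.Int.bxor b (c <<< (1 : Nat))) 255) := by
  have hm1 : 0 <= (c <<< (1 : Nat)) % 256 := by omega
  have hm2 : (c <<< (1 : Nat)) % 256 < 256 := by omega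
  obtain ⟨hi1, hi2⟩ := bxor_bounds b ((c <<< (1 : Nat)) % 256) hb1 hb2 hm1 hm2
  rw [band255_emod (c <<< (1 : Nat))]
  rw [core _ hi1 hi2]
  congr 1
  rw [band255_emod, band255_emod, <- bxor_emod_local]

theorem crc7_spec : Claim_equal_crc7 := by
  intro data crc _hdom hpre
  unfold Spec_crc7 crc7 crc7_alt
  apply PySem.List.foldl_congr_mem
  intro c b hb
  exact step_eq c b (hpre b hb).1 (hpre b hb).2
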